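-- pv_equiv track=rewrite | github.com/heladiofog/CodeSignalPython | FundamentalCodingInterviewPrep/04_Python_Coding_Practice_for_Technical_Interviews/05_Exploring_Array_Interactions_through_Simulation_Games/00_String_Processing_Through_Sequential_Pairing.py | solution
-- ===== SOURCE A (Python) =====
-- def solution(s):
--   removed_letters = []
--   current_string = s[:]
--
--   while len(current_string) > 1:
--     new_string = ''
--     for i in range(0, len(current_string) - 1, 2):
--         if current_string[i] <= current_string[i + 1]:
--           removed_letters.append(current_string[i])
--           new_string += current_string[i + 1]
--         else:
--           removed_letters.append(current_string[i + 1])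
--           new_string += current_string[i]
--
--     # Append the last character if the length is odd
--     if len(current_string) % 2 == 1:
--       new_string += current_string[-1]
--
--     current_string = new_string
--
--   # Append the last remaining character
--   if current_string:
--     removed_letters.append(current_string[0])
--
--   return removed_letters
-- ===== SOURCE B (Python) =====
-- def solution(s):
--   if len(s) < 2:
--     return list(s)
--   it = iter(s)
--   removed, kept = [], []
--   for x, y in zip(it, it):
--     if x <= y:
--       removed.append(x)
--       kept.append(y)
--     else:
--       removed.append(y)
--       kept.append(x)
--   if len(s) % 2:
--     kept.append(s[-1])
--   return removed + solution(''.join(kept))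
-- ===== Notes on version B (the rewrite author's own statement) =====
-- stated objective: simpler
-- what changed: A's outer while-loop with a mutable accumulator becomes recursion on the successively halved string (removed-this-round + solution(kept)), and the index-stepping inner loop (range(0, len-1, 2) with s[i]/s[i+1]) becomes pairwise consumption via zip(it, it) into two lists.
import Mathlib
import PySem

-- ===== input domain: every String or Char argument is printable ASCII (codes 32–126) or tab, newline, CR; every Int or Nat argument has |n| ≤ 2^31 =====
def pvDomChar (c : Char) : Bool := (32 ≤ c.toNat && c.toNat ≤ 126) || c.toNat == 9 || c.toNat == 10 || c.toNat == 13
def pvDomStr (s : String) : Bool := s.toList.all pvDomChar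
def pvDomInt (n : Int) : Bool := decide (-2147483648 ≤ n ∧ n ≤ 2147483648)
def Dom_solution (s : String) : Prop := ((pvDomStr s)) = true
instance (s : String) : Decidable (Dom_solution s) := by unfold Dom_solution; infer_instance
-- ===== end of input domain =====

-- B replaces A's outer while-loop by recursion on the halved string and the
-- index-stepping inner loop by pairwise consumption (zip(it,it)); objective: simpler.

-- ===== PORT A =====
-- body of A's inner `for i in range(0, len - 1, 2)` loop; state = (removed_letters, new_string)
def stepA (cur : List Char) (acc : List String × List Char) (i : Int) : List String × List Char :=
  let x := PySem.List.pyGetD cur i ' '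
  let y := PySem.List.pyGetD cur (i + 1) ' '
  if x ≤ y then (acc.1 ++ [x.toString], acc.2 ++ [y])
  else (acc.1 ++ [y.toString], acc.2 ++ [x])

-- each iteration appends exactly one char to new_string (needed for A's loop termination)
theorem stepA_foldl_snd_len (cur : List Char) (l : List Int) (acc : List String × List Char) :
    ((l.foldl (stepA cur) acc).2).length = acc.2.length + l.length := by
  induction l generalizing acc with
  | nil => simp
  | cons i t ih =>
    simp only [List.foldl_cons]
    rw [ih]
    simp only [stepA]
    split <;> simp <;> omega

-- length of range(0, n-1, 2) for 2 ≤ n is n / 2 (needed for A's loop termination)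
theorem lengthRange2 (n : Nat) (h : 2 ≤ n) :
    (PySem.List.pyRange 0 ((n : Int) - 1) 2).length = n / 2 := by
  rw [PySem.List.pyRange_of_pos _ _ (by norm_num)]
  simp only [List.length_map, List.length_range]
  rw [if_pos (by omega)]
  omega

-- A's while-loop: state = (current_string, removed_letters)
def solLoopA (cur : List Char) (removed : List String) : List String :=
  if _h : 1 < cur.length then
    let st := (PySem.List.pyRange 0 ((cur.length : Int) - 1) 2).foldl (stepA cur) (removed, [])
    let newS := if cur.length % 2 == 1 then st.2 ++ [PySem.List.pyGetD cur (-1) ' '] else st.2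
    solLoopA newS st.1
  else
    match cur with
    | c :: _ => removed ++ [c.toString]
    | [] => removed
termination_by cur.length
decreasing_by
  have hs := stepA_foldl_snd_len cur (PySem.List.pyRange 0 ((cur.length : Int) - 1) 2) (removed, [])
  rw [lengthRange2 cur.length (by omega)] at hs
  split <;> simp_all <;> omega

def solution (s : String) : List String := solLoopA s.toList []

-- ===== PORT B =====
-- B's `for x, y in zip(it, it)` loop: consume the list two at a time,
-- returning (removed this round, kept this round)
def pairRound : List Char → List String × List Char
  | x :: y :: rest =>
    let p := pairRound rest
    if x ≤ y then (x.toString :: p.1, y :: p.2) else (y.toString :: p.1, x :: p.2)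
  | _ => ([], [])

-- each pair keeps exactly one char (needed for B's recursion termination)
theorem pairRound_snd_len : ∀ (l : List Char), (pairRound l).2.length = l.length / 2
  | [] => by simp [pairRound]
  | [x] => by simp [pairRound]
  | x :: y :: rest => by
    have ih := pairRound_snd_len rest
    simp only [pairRound]
    split <;> simp [ih] <;> omega

def solGo (l : List Char) : List String :=
  if _h : l.length < 2 then l.map Char.toString
  else
    let p := pairRound l
    let kept := if l.length % 2 == 1 then p.2 ++ [PySem.List.pyGetD l (-1) ' '] else p.2
    p.1 ++ solGo kept
termination_by l.length
decreasing_by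
  have hs := pairRound_snd_len l
  split <;> simp_all <;> omega

def solution_alt (s : String) : List String := solGo s.toList

-- ===== PRECONDITION & SPEC =====
def Spec_solution (s : String) (out : List String) : Prop := out = solution_alt s
instance (s : String) (out : List String) : Decidable (Spec_solution s out) := by unfold Spec_solution; infer_instance

-- ===== CLAIM (what is proved, stated in full; the proofs are below) =====
def Claim_equal_solution : Prop := ∀ (s : String), Dom_solution s → Spec_solution s (solution s)

-- ===== LEMMAS AND PROOFS =====

-- cons/nil shape of range(a, b, 2)
theorem pyRange2_nil {a b : Int} (h : b ≤ a) : PySem.List.pyRange a b 2 = [] := by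
  rw [PySem.List.pyRange_of_pos _ _ (by norm_num : (0:Int) < 2), if_neg (by omega)]
  simp

theorem pyRange2_cons {a b : Int} (h : a < b) :
    PySem.List.pyRange a b 2 = a :: PySem.List.pyRange (a + 2) b 2 := by
  rw [PySem.List.pyRange_of_pos _ _ (by norm_num : (0:Int) < 2),
      PySem.List.pyRange_of_pos _ _ (by norm_num : (0:Int) < 2),
      if_pos h]
  by_cases h2 : a + 2 < b
  · rw [if_pos h2]
    have : ((b - a + 2 - 1) / 2).toNat = ((b - (a + 2) + 2 - 1) / 2).toNat + 1 := by omega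
    rw [this, List.range_succ_eq_map]
    simp only [List.map_cons, List.map_map]
    simp only [Nat.cast_zero, mul_zero, add_zero]
    congr 1
    apply List.map_congr_left
    intro k _
    simp only [Function.comp]
    push_cast
    ring
  · rw [if_neg h2]
    have : ((b - a + 2 - 1) / 2).toNat = 1 := by omega
    rw [this]
    simp

-- A's foldl over range(j, n-1, 2) = pairRound on the suffix from j
theorem roundAux (cur : List Char) :
    ∀ (k j : Nat), cur.length - j ≤ k → j ≤ cur.length → ∀ (acc : List String × List Char),
      (PySem.List.pyRange (j : Int) ((cur.length : Int) - 1) 2).foldl (stepA cur) acc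
        = (acc.1 ++ (pairRound (cur.drop j)).1, acc.2 ++ (pairRound (cur.drop j)).2) := by
  intro k
  induction k with
  | zero =>
    intro j hk hj acc
    have hj' : j = cur.length := by omega
    subst hj'
    rw [pyRange2_nil (by omega)]
    simp [pairRound]
  | succ k ih =>
    intro j hk hj acc
    by_cases hlt : (j : Int) < (cur.length : Int) - 1
    · rw [pyRange2_cons hlt]
      have hj1 : j + 1 < cur.length := by omega
      have hj0 : j < cur.length := by omega
      have hdrop : cur.drop j = cur[j] :: cur[j+1] :: cur.drop (j + 2) := by
        rw [List.drop_eq_getElem_cons hj0, List.drop_eq_getElem_cons hj1]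
      simp only [List.foldl_cons]
      have hx : PySem.List.pyGetD cur (j : Int) ' ' = cur[j] := by
        simp [PySem.List.pyGetD_natCast, List.getD, List.getElem?_eq_getElem hj0]
      have hy : PySem.List.pyGetD cur ((j : Int) + 1) ' ' = cur[j+1] := by
        have hc : ((j : Int) + 1) = ((j + 1 : Nat) : Int) := by push_cast; ring
        rw [hc, PySem.List.pyGetD_natCast]
        simp [List.getD, List.getElem?_eq_getElem hj1]
      have hcast : ((j : Int) + 2) = ((j + 2 : Nat) : Int) := by push_cast; ring
      rw [hcast]
      rw [ih (j + 2) (by omega) (by omega)]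
      rw [hdrop]
      simp only [pairRound, stepA, hx, hy]
      split <;> simp
    · rw [pyRange2_nil (by omega)]
      have : (pairRound (cur.drop j)).1 = [] ∧ (pairRound (cur.drop j)).2 = [] := by
        have hlen : (cur.drop j).length ≤ 1 := by simp [List.length_drop]; omega
        match hd : cur.drop j with
        | [] => simp [pairRound]
        | [x] => simp [pairRound]
        | x :: y :: t => rw [hd] at hlen; simp at hlen
      simp [this.1, this.2]

theorem roundFold_eq (cur : List Char) (acc : List String × List Char) :
    (PySem.List.pyRange 0 ((cur.length : Int) - 1) 2).foldl (stepA cur) acc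
      = (acc.1 ++ (pairRound cur).1, acc.2 ++ (pairRound cur).2) := by
  have := roundAux cur cur.length 0 (by omega) (by omega) acc
  simpa using this

theorem loop_eq : ∀ (n : Nat) (l : List Char), l.length ≤ n → ∀ (removed : List String),
    solLoopA l removed = removed ++ solGo l := by
  intro n
  induction n with
  | zero =>
    intro l hl removed
    have : l = [] := by cases l <;> simp_all
    subst this
    rw [solLoopA, solGo]
    simp
  | succ n ih =>
    intro l hl removed
    by_cases h : 1 < l.length
    · rw [solLoopA, solGo]
      rw [dif_pos h, dif_neg (by omega)]
      rw [roundFold_eq l (removed, [])]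
      simp only [List.nil_append]
      set kept := if l.length % 2 == 1 then (pairRound l).2 ++ [PySem.List.pyGetD l (-1) ' ']
        else (pairRound l).2 with hkept
      have hklen : kept.length < l.length := by
        have hs := pairRound_snd_len l
        rw [hkept]; split <;> simp_all <;> omega
      rw [ih kept (by omega)]
      simp
    · match l with
      | [] => rw [solLoopA, solGo]; simp
      | [c] => rw [solLoopA, solGo]; simp
      | a :: b :: t => simp at h

-- ===== VERDICT (by name: the statement is the Claim_ definition above) =====
theorem solution_spec : Claim_equal_solution := by
  intro s _
  unfold Spec_solution solution solution_alt
  exact loop_eq s.toList.length s.toList (by omega) []
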